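-- pv_equiv track=rewrite | github.com/aswinpaul/pong_ai_2023 | All initial TnE pong_ai_2023/EnvCodefromCorticalLabs/pong_statetoobs.py | pp_obs
-- ===== SOURCE A (Python) =====
-- def pp_obs(pp):
--
--     # y-position of ball
--     cond = True
--     pp_ranges = [[-100,75]]
--     x = 75
--     while(cond):
--         x2 = x + 75
--         pp_ranges.append([x,x2])
--         x = x2
--         if(x2 > 700):
--             cond = False
--     for r in pp_ranges:
--         if pp in range(r[0], r[1]):
--             o3 = pp_ranges.index(r)
--             return(o3)
-- ===== SOURCE B (Python) =====
-- def pp_obs(pp):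
--     # Closed-form bucket computation instead of building a list of ranges and scanning it.
--     if pp not in range(-100, 750):
--         return None
--     return 0 if pp < 75 else (pp - 75) // 75 + 1
-- ===== Notes on version B (the rewrite author's own statement) =====
-- stated objective: simpler
-- what changed: Replaced the while-loop that builds a list of ranges plus a linear scan with .index by a single range-membership guard and a closed-form floor-division bucket formula.
import Mathlib
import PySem

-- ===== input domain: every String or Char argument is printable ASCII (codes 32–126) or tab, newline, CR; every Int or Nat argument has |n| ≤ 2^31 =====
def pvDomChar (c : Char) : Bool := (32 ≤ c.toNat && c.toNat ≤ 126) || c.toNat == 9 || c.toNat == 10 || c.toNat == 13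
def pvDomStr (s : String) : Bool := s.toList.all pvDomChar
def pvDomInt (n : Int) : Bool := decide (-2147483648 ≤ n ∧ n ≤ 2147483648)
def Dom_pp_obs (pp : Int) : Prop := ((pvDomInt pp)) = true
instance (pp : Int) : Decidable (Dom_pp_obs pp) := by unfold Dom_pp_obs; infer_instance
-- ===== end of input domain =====

-- B replaces A's range-list construction and linear scan by a closed-form bucket formula (simpler).

-- ===== PORT A =====
-- the while loop, with fuel (the loop always terminates after 9 iterations; fuel 1000 is never exhausted)
def ppBuild : Nat → Int → List (Int × Int)
  | 0, _ => []
  | n + 1, x =>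
    let x2 := x + 75
    if x2 > 700 then [(x, x2)] else (x, x2) :: ppBuild n x2

-- the for loop: first range containing pp, returned as pp_ranges.index r (always found when the if fires)
def ppScan (full : List (Int × Int)) (pp : Int) : List (Int × Int) → Option Int
  | [] => none
  | r :: rest =>
    if r.1 ≤ pp ∧ pp < r.2 then (PySem.List.index? full r).map Int.ofNat
    else ppScan full pp rest

def pp_obs (pp : Int) : Option Int :=
  let ranges := (-100, 75) :: ppBuild 100 75
  ppScan ranges pp ranges

-- ===== PORT B =====
def pp_obs_alt (pp : Int) : Option Int :=
  if pp < -100 ∨ 750 ≤ pp then none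
  else some (if pp < 75 then 0 else PySem.Int.floordiv (pp - 75) 75 + 1)

-- ===== PRECONDITION & SPEC =====
def Spec_pp_obs (pp : Int) (out : Option Int) : Prop := out = pp_obs_alt pp
instance (pp : Int) (out : Option Int) : Decidable (Spec_pp_obs pp out) := by unfold Spec_pp_obs; infer_instance

-- ===== CLAIM (what is proved, stated in full; the proofs are below) =====
def Claim_equal_pp_obs : Prop := ∀ (pp : Int), Dom_pp_obs pp → Spec_pp_obs pp (pp_obs pp)

-- ===== LEMMAS AND PROOFS =====

theorem pp_ranges_eval : (-100, 75) :: ppBuild 100 75 =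
    [(-100,75),(75,150),(150,225),(225,300),(300,375),(375,450),(450,525),(525,600),(600,675),(675,750)] := by
  decide

set_option maxHeartbeats 4000000 in
-- ===== VERDICT (by name: the statement is the Claim_ definition above) =====
theorem pp_obs_spec : Claim_equal_pp_obs := by
  intro pp _
  unfold Spec_pp_obs pp_obs pp_obs_alt
  rw [pp_ranges_eval]
  simp only [ppScan, PySem.List.index?]
  split_ifs <;>
    first
      | omega
      | (exfalso; omega)
      | (simp_all [List.idxOf?, List.findIdx?];
         try simp only [List.findIdx?.go]; try simp; try omega)
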